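-- pv_equiv track=rewrite | github.com/paualbiol/testServer | testServidor/app/scripts/entrada.py | format_horario
-- ===== SOURCE A (Python) =====
-- def format_horario(horario_inp):
--     # Encontrar comienzo de filas no vacías.
--     ini = 0
--     finished = False
--     while ini < len(horario_inp):
--         for j in range(0, len(horario_inp[0])):
--             if horario_inp[ini][j] == -2:
--                 finished = True
--         if finished: break
--         ini += 1
--
--     # Encontrar fin de filas no vacías
--     fin = len(horario_inp) - 1
--     finished = False
--     while fin >= 0:
--         for j in range(0, len(horario_inp[0])):
--             if horario_inp[fin][j] == -2:
--                 finished = True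
--         if finished: break
--         fin -= 1
--
--     # Crear vector formateado.
--     horario = []
--     for i in range(ini, fin):
--         horario.append(horario_inp[i])
--
--     return horario, 9 + ini
-- ===== SOURCE B (Python) =====
-- def format_horario(horario_inp):
--     width = len(horario_inp[0]) if horario_inp else 0
--     matches = [i for i, row in enumerate(horario_inp) if -2 in row[:width]]
--     if matches:
--         ini, fin = matches[0], matches[-1]
--     else:
--         ini, fin = len(horario_inp), -1
--     return horario_inp[ini:fin], 9 + ini
-- ===== Notes on version B (the rewrite author's own statement) =====
-- stated objective: simpler
-- what changed: Replaces A's two directed while-scans (top-down and bottom-up, each with an inner column loop and a 'finished' flag) by one forward pass that collects all matching row indices and takes their extremes, then slices.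
-- outside the precondition, e.g. on format_horario([[-2, 1], [5], [-2, 1]]): A returns ([[-2, 1], [5]], 9), B returns ([[-2, 1], [5]], 9)
import Mathlib
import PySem

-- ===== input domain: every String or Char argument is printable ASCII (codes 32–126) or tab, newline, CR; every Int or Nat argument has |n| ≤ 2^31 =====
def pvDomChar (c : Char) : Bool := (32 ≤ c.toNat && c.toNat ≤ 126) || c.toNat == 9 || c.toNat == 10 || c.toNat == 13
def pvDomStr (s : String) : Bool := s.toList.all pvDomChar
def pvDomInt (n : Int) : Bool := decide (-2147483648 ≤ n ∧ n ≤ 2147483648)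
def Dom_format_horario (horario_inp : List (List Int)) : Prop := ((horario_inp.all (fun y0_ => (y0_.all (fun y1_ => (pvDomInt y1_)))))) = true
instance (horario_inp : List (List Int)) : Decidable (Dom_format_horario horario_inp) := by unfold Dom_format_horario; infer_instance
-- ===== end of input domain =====

-- B replaces A's two directed border scans by a single forward pass that records all
-- matching row indices and takes their extremes (objective: simpler).

-- ===== PORT A =====
-- inner 'for j in range(0, len(horario_inp[0]))' loop updating the 'finished' flag
def pvA_rowCheck (row : List Int) (L : Int) : Bool :=
  (PySem.List.pyRange 0 L 1).foldl
    (fun finished j => if PySem.List.pyGetD row j 0 == -2 then true else finished) false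

-- 'while ini < len(horario_inp)' top-down scan; fuel = remaining iterations (ini + fuel = len)
def pvA_findIni (rows : List (List Int)) (L : Int) (ini : Nat) : Nat → Nat
  | 0 => ini
  | fuel + 1 =>
    if pvA_rowCheck (PySem.List.pyGetD rows (ini : Int) []) L then ini
    else pvA_findIni rows L (ini + 1) fuel

-- 'while fin >= 0' bottom-up scan; argument k encodes fin + 1 (k = 0 means fin = -1)
def pvA_findFin (rows : List (List Int)) (L : Int) : Nat → Int
  | 0 => -1
  | k + 1 =>
    if pvA_rowCheck (PySem.List.pyGetD rows (k : Int) []) L then (k : Int)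
    else pvA_findFin rows L k

def format_horario (horario_inp : List (List Int)) : List (List Int) × Int :=
  let L : Int := ((PySem.List.pyGetD horario_inp 0 []).length : Int)
  let ini := pvA_findIni horario_inp L 0 horario_inp.length
  let fin := pvA_findFin horario_inp L horario_inp.length
  let horario := (PySem.List.pyRange (ini : Int) fin 1).map
    (fun i => PySem.List.pyGetD horario_inp i [])
  (horario, 9 + (ini : Int))

-- ===== PORT B =====
def format_horario_alt (horario_inp : List (List Int)) : List (List Int) × Int :=
  let width := (horario_inp.headD []).length
  let hits : List Int := (PySem.List.enumerate horario_inp 0).filterMap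
    (fun ir => if (ir.2.take width).contains (-2) then some ir.1 else none)
  let ini : Int := hits.headD (horario_inp.length : Int)
  let fin : Int := hits.getLastD (-1)
  (PySem.List.slice horario_inp (some ini) (some fin), 9 + ini)

-- ===== PRECONDITION & SPEC =====
-- Pre_ excludes lists containing a row shorter than row 0: A's column scan always ranges
-- over row 0's length, so it raises IndexError whenever such a row is reached by the
-- border scans (on unreached middle rows A happens to return; B agrees there too).
def Pre_format_horario (horario_inp : List (List Int)) : Prop :=
  ∀ row ∈ horario_inp, (horario_inp.headD []).length ≤ row.length
instance (horario_inp : List (List Int)) : Decidable (Pre_format_horario horario_inp) := by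
  unfold Pre_format_horario; infer_instance
def pvWitness_format_horario : List (List Int) := [[0, 0], [-2, 1], [0, 0]]
def Spec_format_horario (horario_inp : List (List Int)) (out : List (List Int) × Int) : Prop := out = format_horario_alt horario_inp
instance (horario_inp : List (List Int)) (out : List (List Int) × Int) : Decidable (Spec_format_horario horario_inp out) := by unfold Spec_format_horario; infer_instance

-- ===== CLAIM (what is proved, stated in full; the proofs are below) =====
def Claim_equal_format_horario : Prop := ∀ (horario_inp : List (List Int)), Dom_format_horario horario_inp → Pre_format_horario horario_inp → Spec_format_horario horario_inp (format_horario horario_inp)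

-- ===== LEMMAS AND PROOFS =====

theorem pv_foldl_flag (l : List Int) (q : Int → Bool) (b0 : Bool) :
    l.foldl (fun b j => if q j then true else b) b0 = (b0 || l.any q) := by
  induction l generalizing b0 with
  | nil => simp
  | cons x xs ih =>
    simp only [List.foldl_cons, List.any_cons, ih]
    by_cases h : q x <;> simp [h]

theorem pv_filterMap_if (l : List Nat) (q : Nat → Bool) (f : Nat → Int) :
    l.filterMap (fun k => if q k then some (f k) else none) = (l.filter q).map f := by
  induction l with
  | nil => rfl
  | cons x xs ih => by_cases h : q x <;> simp [List.filter_cons, h, ih]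

theorem pv_head?_filter (l : List Nat) (q : Nat → Bool) :
    (l.filter q).head? = l.find? q := by
  induction l with
  | nil => rfl
  | cons x xs ih => by_cases h : q x <;> simp [List.filter_cons, List.find?_cons, h, ih]

theorem pv_getLast?_filter (l : List Nat) (q : Nat → Bool) :
    (l.filter q).getLast? = l.reverse.find? q := by
  rw [List.getLast?_eq_head?_reverse, ← List.filter_reverse, pv_head?_filter]

theorem pv_rowCheck_eq (row : List Int) (L : Nat) (h : L ≤ row.length) :
    pvA_rowCheck row (L : Int) = (row.take L).contains (-2) := by
  unfold pvA_rowCheck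
  rw [pv_foldl_flag, PySem.List.pyRange_one]
  rw [Bool.eq_iff_iff]
  simp only [Bool.false_or, List.any_eq_true, List.mem_map, List.mem_range,
    List.contains_eq_mem, List.mem_take_iff_getElem, decide_eq_true_eq]
  constructor
  · rintro ⟨j, ⟨k, hk, rfl⟩, hq⟩
    have hk' : k < L := by omega
    have hkr : k < row.length := by omega
    simp only [zero_add, PySem.List.pyGetD_natCast, beq_iff_eq] at hq
    rw [List.getD_eq_getElem _ _ hkr] at hq
    exact ⟨k, by omega, hq⟩
  · rintro ⟨k, hk, hv⟩
    have hk' : k < L := by omega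
    have hkr : k < row.length := by omega
    refine ⟨(k : Int), ⟨k, by omega, by ring⟩, ?_⟩
    simp only [zero_add, PySem.List.pyGetD_natCast, beq_iff_eq]
    rw [List.getD_eq_getElem _ _ hkr, hv]
def pvP (rows : List (List Int)) (L : Nat) (i : Nat) : Bool :=
  ((rows[i]?.getD []).take L).contains (-2)

theorem pv_getD_eq (rows : List (List Int)) (i : Nat) :
    List.getD rows i [] = rows[i]?.getD [] := rfl

theorem pv_findIni_spec (rows : List (List Int)) (L : Nat)
    (hL : ∀ row ∈ rows, L ≤ row.length) :
    ∀ fuel ini, ini + fuel = rows.length →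
      pvA_findIni rows (L : Int) ini fuel =
        (((List.range' ini fuel).find? (pvP rows L)).getD (ini + fuel)) := by
  intro fuel
  induction fuel with
  | zero => intro ini _; simp [pvA_findIni]
  | succ fuel ih =>
    intro ini hlen
    have hini : ini < rows.length := by omega
    have hmem : rows.getD ini [] ∈ rows := by
      rw [List.getD_eq_getElem _ _ hini]; exact List.getElem_mem hini
    unfold pvA_findIni
    rw [List.range'_succ, List.find?_cons]
    simp only [PySem.List.pyGetD_natCast]
    rw [pv_rowCheck_eq _ _ (hL _ hmem), pv_getD_eq, ← pvP]
    cases h : pvP rows L ini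
    · simp only [h, Bool.false_eq_true, if_false]
      rw [ih (ini + 1) (by omega)]
      congr 1
      omega
    · simp [h]

theorem pv_findFin_spec (rows : List (List Int)) (L : Nat)
    (hL : ∀ row ∈ rows, L ≤ row.length) :
    ∀ k, k ≤ rows.length →
      pvA_findFin rows (L : Int) k =
        ((((List.range k).reverse.find? (pvP rows L)).map (fun i : Nat => (i : Int))).getD (-1)) := by
  intro k
  induction k with
  | zero => intro _; simp [pvA_findFin]
  | succ k ih =>
    intro hk
    have hkn : k < rows.length := by omega
    have hmem : rows.getD k [] ∈ rows := by
      rw [List.getD_eq_getElem _ _ hkn]; exact List.getElem_mem hkn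
    unfold pvA_findFin
    rw [List.range_succ, List.reverse_append, List.reverse_singleton, List.singleton_append,
      List.find?_cons]
    simp only [PySem.List.pyGetD_natCast]
    rw [pv_rowCheck_eq _ _ (hL _ hmem), pv_getD_eq, ← pvP]
    cases h : pvP rows L k
    · simp only [h, Bool.false_eq_true, if_false]
      exact ih (by omega)
    · simp [h]
theorem pv_hits_eq (rows : List (List Int)) (L : Nat) :
    ((PySem.List.enumerate rows 0).filterMap
      (fun ir => if (ir.2.take L).contains (-2) then some ir.1 else none)) =
    ((List.range rows.length).filter (pvP rows L)).map (fun i : Nat => (i : Int)) := by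
  rw [PySem.List.enumerate_eq_map_pyRange (xs := rows) (d := ([] : List Int)),
    List.filterMap_map, PySem.List.pyRange_one]
  simp only [PySem.List.len, Int.sub_zero, Int.toNat_natCast, List.filterMap_map]
  trans (List.filterMap (fun k => if pvP rows L k then some ((k : Int)) else none)
    (List.range rows.length))
  · apply List.filterMap_congr
    intro k _
    simp only [Function.comp, zero_add, PySem.List.pyGetD_natCast, pv_getD_eq, pvP]
    norm_cast
  · exact pv_filterMap_if (List.range rows.length) (pvP rows L) (fun i : Nat => (i : Int))

theorem pv_window (rows : List (List Int)) (i0 j0 : Nat) (hj : j0 ≤ rows.length) :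
    (PySem.List.pyRange (i0 : Int) (j0 : Int) 1).map (fun i => PySem.List.pyGetD rows i []) =
      (rows.drop i0).take (j0 - i0) := by
  rw [PySem.List.pyRange_one, List.map_map]
  apply List.ext_getElem
  · simp; omega
  · intro k hk1 hk2
    simp only [List.getElem_map, List.getElem_range, Function.comp]
    have hk : k < j0 - i0 := by simp at hk1; omega
    have hik : i0 + k < rows.length := by omega
    have hc : ((i0 : Int) + (k : Int)) = ((i0 + k : Nat) : Int) := by push_cast; ring
    rw [hc, PySem.List.pyGetD_natCast]
    rw [List.getElem_take, List.getElem_drop]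
    rw [pv_getD_eq]
    simp [List.getElem?_eq_getElem hik]

theorem pv_headD (rows : List (List Int)) : PySem.List.pyGetD rows 0 [] = rows.headD [] := by
  cases rows <;> simp [PySem.List.pyGetD_zero]

theorem pv_main : ∀ (rows : List (List Int)), Pre_format_horario rows →
    format_horario rows = format_horario_alt rows := by
  intro rows hPre
  unfold format_horario format_horario_alt
  dsimp only
  rw [pv_headD]
  set L := (rows.headD []).length with hLdef
  set n := rows.length with hndef
  have hIni := pv_findIni_spec rows L hPre n 0 (by omega)
  have hFin := pv_findFin_spec rows L hPre n le_rfl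
  rw [pv_hits_eq rows L]
  rw [List.range_eq_range'] at *
  cases hfind : (List.range' 0 n).find? (pvP rows L) with
  | none =>
    have hnil : (List.range' 0 n).filter (pvP rows L) = [] := by
      rw [List.filter_eq_nil_iff]
      intro x hx
      have := List.find?_eq_none.mp hfind x hx
      simpa using this
    have hrev : (List.range' 0 n).reverse.find? (pvP rows L) = none := by
      rw [List.find?_eq_none]
      intro x hx
      have := List.find?_eq_none.mp hfind x (List.mem_reverse.mp hx)
      simpa using this
    rw [hIni, hFin, hfind, hrev, hnil]
    simp only [Option.getD_none, Option.map_none, List.map_nil, List.headD_nil, List.getLastD_nil,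
      Nat.zero_add]
    have hA : (PySem.List.pyRange ((n : Int)) (-1) 1) = [] :=
      PySem.List.pyRange_one_eq_nil (by omega)
    have hB : PySem.List.slice rows (some ((n : Int))) (some (-1)) = [] := by
      apply List.eq_nil_of_length_eq_zero
      rw [PySem.List.length_slice]
      simp [PySem.List.clampIdx_natCast]
      omega
    rw [hA, hB]
    simp
  | some i0 =>
    have hi0 : i0 < n := by
      have := List.mem_of_find?_eq_some hfind
      simp [List.mem_range'] at this
      omega
    have hp0 : pvP rows L i0 := List.find?_some hfind
    cases hrev : (List.range' 0 n).reverse.find? (pvP rows L) with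
    | none =>
      exfalso
      have := List.find?_eq_none.mp hrev i0 (List.mem_reverse.mpr (List.mem_of_find?_eq_some hfind))
      simp [hp0] at this
    | some j0 =>
      have hj0 : j0 < n := by
        have := List.mem_of_find?_eq_some hrev
        rw [List.mem_reverse] at this
        simp [List.mem_range'] at this
        omega
      rw [hIni, hFin, hfind, hrev]
      have hh : ((List.range' 0 n).filter (pvP rows L)).head? = some i0 := by
        rw [pv_head?_filter, hfind]
      have hl : ((List.range' 0 n).filter (pvP rows L)).getLast? = some j0 := by
        rw [pv_getLast?_filter, hrev]
      simp only [Option.getD_some, Option.map_some]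
      rw [List.headD_eq_head?_getD, List.getLastD_eq_getLast?, List.head?_map,
        List.getLast?_map, hh, hl]
      simp only [Option.map_some, Option.getD_some]
      rw [PySem.List.slice_natCast, pv_window rows i0 j0 (by omega)]

-- ===== VERDICT (by name: the statement is the Claim_ definition above) =====
theorem format_horario_spec : Claim_equal_format_horario := by
  intro rows _ hPre
  unfold Spec_format_horario
  exact pv_main rows hPre
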